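-- pv_equiv track=rewrite | github.com/jasonbrackman/advent_of_code_2017 | day_10.py | dense_hash
-- ===== SOURCE A (Python) =====
-- def dense_hash(hash):
--     """
--     Takes in a sparse hash and xors all numbers in groups of 16
--     - a 256 length sparse hash will generate a 16 numbered array.
--     :param hash:
--     :return:
--     """
--     results = list()
--     for index in range(0, len(hash), 16):
--         total = 0
--         list_01 = hash[index:index+16]
--         for i in list_01:
--             total ^= i
--         results.append(total)
--
--     return results
-- ===== SOURCE B (Python) =====
-- def dense_hash(hash):
--     results = []
--     acc = 0
--     cnt = 0
--     for v in hash: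
--         acc ^= v
--         cnt += 1
--         if cnt == 16:
--             results.append(acc)
--             acc = 0
--             cnt = 0
--     if cnt:
--         results.append(acc)
--     return results
-- ===== Notes on version B (the rewrite author's own statement) =====
-- stated objective: alternative
-- what changed: Replaces the chunked range(0,len,16)-with-slicing-and-inner-reduce loop by a single streaming pass that xors into an accumulator and emits it every 16 elements (flushing a final partial group), so no sublists are built.
import Mathlib
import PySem

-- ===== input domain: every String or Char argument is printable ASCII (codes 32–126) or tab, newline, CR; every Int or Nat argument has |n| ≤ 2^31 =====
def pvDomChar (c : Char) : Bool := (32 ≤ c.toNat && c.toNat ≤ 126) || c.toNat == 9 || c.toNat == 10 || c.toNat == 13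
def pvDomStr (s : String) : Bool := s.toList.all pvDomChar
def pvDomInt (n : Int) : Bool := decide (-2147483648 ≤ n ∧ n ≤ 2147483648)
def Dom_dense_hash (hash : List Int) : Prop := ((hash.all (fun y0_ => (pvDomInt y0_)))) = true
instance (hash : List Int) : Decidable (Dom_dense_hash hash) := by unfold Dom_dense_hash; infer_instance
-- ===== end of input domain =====

-- B replaces A's chunk-slice-and-reduce loop by one streaming pass with an xor accumulator flushed every 16 elements (alternative decomposition, same cost).

-- ===== PORT A =====
def dense_hash (hash : List Int) : List Int :=
  (PySem.List.pyRange 0 (hash.length : Int) 16).foldl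
    (fun results index =>
      results ++ [(PySem.List.slice hash (some index) (some (index + 16))).foldl
        (fun total i => PySem.Int.bxor total i) 0])
    []

-- ===== PORT B =====
def dense_hash_alt (hash : List Int) : List Int :=
  let st := hash.foldl
    (fun (s : List Int × Int × Int) v =>
      let acc := PySem.Int.bxor s.2.1 v
      let cnt := s.2.2 + 1
      if cnt = 16 then (s.1 ++ [acc], 0, 0) else (s.1, acc, cnt))
    ([], 0, 0)
  if st.2.2 ≠ 0 then st.1 ++ [st.2.1] else st.1

-- ===== PRECONDITION & SPEC =====
def Spec_dense_hash (hash : List Int) (out : List Int) : Prop := out = dense_hash_alt hash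
instance (hash : List Int) (out : List Int) : Decidable (Spec_dense_hash hash out) := by unfold Spec_dense_hash; infer_instance

-- ===== CLAIM (what is proved, stated in full; the proofs are below) =====
def Claim_equal_dense_hash : Prop := ∀ (hash : List Int), Dom_dense_hash hash → Spec_dense_hash hash (dense_hash hash)

-- ===== LEMMAS AND PROOFS =====

-- Reference: xor of successive 16-chunks, by structural recursion.
def refC (l : List Int) : List Int :=
  if h : l = [] then []
  else ((l.take 16).foldl PySem.Int.bxor 0) :: refC (l.drop 16)
termination_by l.length
decreasing_by
  cases l with
  | nil => exact absurd rfl h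
  | cons x xs => simp

-- B's loop body, named for the proofs (definitionally the lambda in dense_hash_alt).
def stepB (s : List Int × Int × Int) (v : Int) : List Int × Int × Int :=
  let acc := PySem.Int.bxor s.2.1 v
  let cnt := s.2.2 + 1
  if cnt = 16 then (s.1 ++ [acc], 0, 0) else (s.1, acc, cnt)

def finishB (s : List Int × Int × Int) : List Int :=
  if s.2.2 ≠ 0 then s.1 ++ [s.2.1] else s.1

lemma alt_eq (l : List Int) : dense_hash_alt l = finishB (l.foldl stepB ([], 0, 0)) := rfl

lemma inv1 (l : List Int) : ∀ (r : List Int) (a c : Int), 0 ≤ c → c + l.length < 16 →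
    l.foldl stepB (r, a, c) = (r, l.foldl PySem.Int.bxor a, c + l.length) := by
  induction l with
  | nil => intro r a c _ _; simp
  | cons v t ih =>
    intro r a c hc h
    have hne : ¬ (c + 1 = 16) := by simp at h; omega
    rw [List.foldl_cons, show stepB (r, a, c) v = (r, PySem.Int.bxor a v, c + 1) from by
      simp [stepB, hne]]
    rw [ih (r) _ (c + 1) (by omega) (by simp at h ⊢; omega)]
    simp; omega

lemma inv2 (l : List Int) : ∀ (r : List Int) (a c : Int), 0 ≤ c → c + l.length = 16 → l ≠ [] →
    l.foldl stepB (r, a, c) = (r ++ [l.foldl PySem.Int.bxor a], 0, 0) := by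
  induction l with
  | nil => intro _ _ _ _ _ h; exact absurd rfl h
  | cons v t ih =>
    intro r a c hc h _
    cases t with
    | nil =>
      have : c + 1 = 16 := by simpa using h
      simp [stepB, this]
    | cons w u =>
      have hne : ¬ (c + 1 = 16) := by simp at h; omega
      rw [List.foldl_cons, show stepB (r, a, c) v = (r, PySem.Int.bxor a v, c + 1) from by
        simp [stepB, hne]]
      rw [ih r _ (c + 1) (by omega) (by simp at h ⊢; omega) (by simp)]
      simp

lemma B_main : ∀ (n : Nat) (l : List Int) (r : List Int), l.length ≤ n →
    finishB (l.foldl stepB (r, 0, 0)) = r ++ refC l := by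
  intro n
  induction n with
  | zero =>
    intro l r h
    have : l = [] := by cases l <;> simp_all
    subst this; simp [finishB, refC]
  | succ n ih =>
    intro l r h
    by_cases hnil : l = []
    · subst hnil; simp [finishB, refC]
    by_cases hlt : l.length < 16
    · rw [inv1 l r 0 0 le_rfl (by omega)]
      have hlen : l.length ≠ 0 := by simpa using hnil
      have hd : l.drop 16 = [] := by simp; omega
      rw [refC, dif_neg hnil, hd]
      have ht : l.take 16 = l := List.take_of_length_le (by omega)
      simp [finishB, refC, ht, hlen]
    · have hsplit : l = l.take 16 ++ l.drop 16 := (List.take_append_drop 16 l).symm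
      conv_lhs => rw [hsplit]
      rw [List.foldl_append]
      rw [inv2 (l.take 16) r 0 0 le_rfl (by simp; omega) (by simp; omega)]
      rw [ih (l.drop 16) _ (by simp; omega)]
      conv_rhs => rw [refC]
      rw [dif_neg hnil]
      simp

lemma B_eq_ref (l : List Int) : dense_hash_alt l = refC l := by
  have := B_main l.length l [] le_rfl
  simpa [alt_eq] using this

-- A as a map over chunk indices.
lemma A_map (l : List Int) :
    dense_hash l = (List.range ((l.length + 15) / 16)).map
      (fun k => ((l.drop (16 * k)).take 16).foldl PySem.Int.bxor 0) := by
  unfold dense_hash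
  rw [PySem.List.foldl_append_singleton_eq_map]
  rw [PySem.List.pyRange_of_pos 0 (l.length : Int) (by norm_num)]
  rw [List.map_map]
  have hcount : (if (0 : Int) < (l.length : Int) then ((((l.length : Int)) - 0 + 16 - 1) / 16).toNat else 0)
      = (l.length + 15) / 16 := by
    split
    · next h =>
      rw [show ((l.length : Int) - 0 + 16 - 1) = (((l.length + 15 : Nat)) : Int) from by
        push_cast; ring]
      rfl
    · next h =>
      have : l.length = 0 := by omega
      simp [this]
  rw [hcount]
  apply List.map_congr_left
  intro k _
  simp only [Function.comp_apply]
  have h1 : (0 : Int) ≤ 0 + 16 * (k : Int) := by positivity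
  have h2 : (0 : Int) ≤ 0 + 16 * (k : Int) + 16 := by positivity
  have hslice : PySem.List.slice l (some (0 + 16 * (k : Int)))
      (some (0 + 16 * (k : Int) + 16)) = List.take 16 (List.drop (16 * k) l) := by
    rw [PySem.List.slice_toNat l h1 h2]
    congr 1
    · omega
    · congr 1; omega
  rw [hslice]

lemma A_eq_ref : ∀ (n : Nat) (l : List Int), l.length ≤ n → dense_hash l = refC l := by
  intro n
  induction n with
  | zero =>
    intro l h
    have : l = [] := by cases l <;> simp_all
    subst this; simp [A_map, refC]
  | succ n ih =>
    intro l h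
    by_cases hnil : l = []
    · subst hnil; simp [A_map, refC]
    have hlen : l.length ≠ 0 := by simpa using hnil
    rw [A_map, refC, dif_neg hnil]
    have hm : (l.length + 15) / 16 = ((l.drop 16).length + 15) / 16 + 1 := by
      simp; omega
    rw [hm, List.range_succ_eq_map, List.map_cons, List.map_map]
    have htail := ih (l.drop 16) (by simp; omega)
    rw [A_map] at htail
    refine List.cons_eq_cons.mpr ⟨by simp, ?_⟩
    rw [← htail]
    apply List.map_congr_left
    intro k _
    simp only [Function.comp_apply]
    rw [List.drop_drop]
    have e : 16 * Nat.succ k = 16 + 16 * k := by omega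
    rw [e]

-- ===== VERDICT (by name: the statement is the Claim_ definition above) =====
theorem dense_hash_spec : Claim_equal_dense_hash := by
  intro hash _
  unfold Spec_dense_hash
  rw [B_eq_ref, A_eq_ref hash.length hash le_rfl]
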